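-- pv_equiv track=rewrite | github.com/leonedott/ven_name_generator | ven_name/toolbox_primer_nombre.py | exc_03
-- ===== SOURCE A (Python) =====
-- def exc_03(variable, choice):
--     '''
--     EN: Exceptions for the first consonant of the second syllable.
--     ES: Excepciones para la elección de la primera consonante de la segunda sílaba.
--     '''
--     para_ll = ['k', 'll', 'l', 'rr', 'f', 'y']
--     para_s = ['rr', 'r']
--     para_ss = ['rr', 'll']
--     para_l = ['l', 'll', 'rr']
--     para_z = ['cl', 'l', 'll', 'rr', 'kl']
--     para_x = ['k', 'kl', 'rr']
--     para_r = ['r', 'rr']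
--
--     if 'll' in variable and any(x in choice for x in para_ll):
--         return False
--     elif 's' in variable and any(x in choice for x in para_s):
--         return False
--     elif 'ss' in variable and any(x in choice for x in para_ss):
--         return False
--     elif 'l' in variable and any(x in choice for x in para_l):
--         return False
--     elif 'z' in variable and any(x in choice for x in para_z):
--         return False
--     elif 'x' in variable and any(x in choice for x in para_x):
--         return False
--     elif 'r' in variable and any(x in choice for x in para_r):
--         return False
--     else:
--         return True
-- ===== SOURCE B (Python) =====
-- def exc_03(variable, choice):
--     # Inverted, logically simplified rule table: for each distinct forbidden
--     # token, the (pre-simplified) condition on `variable` under which it is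
--     # forbidden.  Simplifications use the substring facts 'll' in v => 'l' in v
--     # and 'ss' in v => 's' in v, so A's per-trigger branching disappears.
--     ll_ = 'll' in variable
--     s_ = 's' in variable
--     ss_ = 'ss' in variable
--     l_ = 'l' in variable
--     z_ = 'z' in variable
--     x_ = 'x' in variable
--     r_ = 'r' in variable
--     checks = [
--         (ll_ or x_, 'k'),
--         (ss_ or l_ or z_, 'll'),
--         (l_ or z_, 'l'),
--         (s_ or l_ or z_ or x_ or r_, 'rr'),
--         (ll_, 'f'),
--         (ll_, 'y'),
--         (s_ or r_, 'r'),
--         (z_, 'cl'),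
--         (z_ or x_, 'kl'),
--     ]
--     return not any(cond and tok in choice for cond, tok in checks)
-- ===== Notes on version B (the rewrite author's own statement) =====
-- stated objective: alternative
-- what changed: Transposed the rule table: instead of A's per-trigger if/elif chain, B keys on each distinct forbidden token and pairs it with a pre-simplified boolean condition on variable (using 'll' in v => 'l' in v and 'ss' in v => 's' in v to drop redundant triggers), then one scan checks token-in-choice against its condition.
import Mathlib
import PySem

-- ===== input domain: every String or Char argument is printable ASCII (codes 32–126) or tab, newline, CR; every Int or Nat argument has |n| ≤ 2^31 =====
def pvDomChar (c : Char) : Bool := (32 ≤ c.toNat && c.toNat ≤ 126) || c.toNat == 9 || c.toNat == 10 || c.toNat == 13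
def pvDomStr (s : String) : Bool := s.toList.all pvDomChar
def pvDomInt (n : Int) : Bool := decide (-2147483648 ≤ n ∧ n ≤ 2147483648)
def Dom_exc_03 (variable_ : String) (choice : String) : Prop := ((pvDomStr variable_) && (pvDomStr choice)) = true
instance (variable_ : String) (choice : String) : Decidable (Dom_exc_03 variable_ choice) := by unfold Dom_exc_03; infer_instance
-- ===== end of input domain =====

-- B transposes A's trigger-keyed if/elif chain into a token-keyed table with
-- logically simplified per-token conditions (using 'll'⊆v ⇒ 'l'⊆v, 'ss'⊆v ⇒ 's'⊆v)
-- followed by one token-in-choice scan (objective: alternative).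

-- ===== PORT A =====
def exc_03 (variable_ : String) (choice : String) : Bool :=
  let para_ll := ["k", "ll", "l", "rr", "f", "y"]
  let para_s := ["rr", "r"]
  let para_ss := ["rr", "ll"]
  let para_l := ["l", "ll", "rr"]
  let para_z := ["cl", "l", "ll", "rr", "kl"]
  let para_x := ["k", "kl", "rr"]
  let para_r := ["r", "rr"]
  if PySem.Str.isIn "ll" variable_ && para_ll.any (fun x => PySem.Str.isIn x choice) then false
  else if PySem.Str.isIn "s" variable_ && para_s.any (fun x => PySem.Str.isIn x choice) then false
  else if PySem.Str.isIn "ss" variable_ && para_ss.any (fun x => PySem.Str.isIn x choice) then false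
  else if PySem.Str.isIn "l" variable_ && para_l.any (fun x => PySem.Str.isIn x choice) then false
  else if PySem.Str.isIn "z" variable_ && para_z.any (fun x => PySem.Str.isIn x choice) then false
  else if PySem.Str.isIn "x" variable_ && para_x.any (fun x => PySem.Str.isIn x choice) then false
  else if PySem.Str.isIn "r" variable_ && para_r.any (fun x => PySem.Str.isIn x choice) then false
  else true

-- ===== PORT B =====
def exc_03_alt (variable_ : String) (choice : String) : Bool :=
  let ll_ := PySem.Str.isIn "ll" variable_
  let s_ := PySem.Str.isIn "s" variable_
  let ss_ := PySem.Str.isIn "ss" variable_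
  let l_ := PySem.Str.isIn "l" variable_
  let z_ := PySem.Str.isIn "z" variable_
  let x_ := PySem.Str.isIn "x" variable_
  let r_ := PySem.Str.isIn "r" variable_
  let checks : List (Bool × String) :=
    [(ll_ || x_, "k"),
     (ss_ || l_ || z_, "ll"),
     (l_ || z_, "l"),
     (s_ || l_ || z_ || x_ || r_, "rr"),
     (ll_, "f"),
     (ll_, "y"),
     (s_ || r_, "r"),
     (z_, "cl"),
     (z_ || x_, "kl")]
  ! checks.any (fun p => p.1 && PySem.Str.isIn p.2 choice)

-- ===== PRECONDITION & SPEC =====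
def Spec_exc_03 (variable_ : String) (choice : String) (out : Bool) : Prop := out = exc_03_alt variable_ choice
instance (variable_ : String) (choice : String) (out : Bool) : Decidable (Spec_exc_03 variable_ choice out) := by unfold Spec_exc_03; infer_instance

-- ===== CLAIM =====
def Claim_equal_exc_03 : Prop := ∀ (variable_ : String) (choice : String), Dom_exc_03 variable_ choice → Spec_exc_03 variable_ choice (exc_03 variable_ choice)

-- ===== LEMMAS AND PROOFS =====

-- substring monotonicity: if t is an infix of u, 'u in v' implies 't in v'
lemma isIn_of_isIn_of_infix (t u v : String) (h : t.toList <:+: u.toList)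
    (hu : PySem.Str.isIn u v = true) : PySem.Str.isIn t v = true := by
  rw [PySem.Str.isIn_iff_infix] at hu ⊢
  exact h.trans hu

-- the two boolean shapes agree given the two trigger implications
set_option maxHeartbeats 2000000 in
lemma bool_core (a b c d e f g K LL L RR F Y R CL KL : Bool)
    (had : a = true → d = true) (hcb : c = true → b = true) :
    (if a && (K || (LL || (L || (RR || (F || (Y || false)))))) then false
     else if b && (RR || (R || false)) then false
     else if c && (RR || (LL || false)) then false
     else if d && (L || (LL || (RR || false))) then false
     else if e && (CL || (L || (LL || (RR || (KL || false))))) then false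
     else if f && (K || (KL || (RR || false))) then false
     else if g && (R || (RR || false)) then false
     else true)
    = !(((a || f) && K) || (((c || d || e) && LL) || (((d || e) && L) ||
        (((b || d || e || f || g) && RR) || ((a && F) || ((a && Y) ||
        (((b || g) && R) || ((e && CL) || (((e || f) && KL) || false))))))))) := by
  revert had hcb
  revert K LL L RR F Y R CL KL
  cases a <;> cases b <;> cases c <;> cases d <;> cases e <;> cases f <;> cases g <;> decide

-- ===== VERDICT =====
theorem exc_03_spec : Claim_equal_exc_03 := by
  intro variable_ choice _
  unfold Spec_exc_03 exc_03 exc_03_alt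
  simp only [List.any_cons, List.any_nil]
  exact bool_core _ _ _ _ _ _ _ _ _ _ _ _ _ _ _ _
    (isIn_of_isIn_of_infix "l" "ll" variable_ (by decide))
    (isIn_of_isIn_of_infix "s" "ss" variable_ (by decide))
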